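-- pv_equiv track=rewrite | github.com/linhnt31/Python | Competitive Progamming/CodeSignal/Tourements/1_4_2019.py | checkSameElementExistence
-- ===== SOURCE A (Python) =====
-- def checkSameElementExistence(arr1, arr2):
--
--     i = 0
--     j = 0
--     while i < len(arr1) and j < len(arr2):
--         if arr1[i] == arr2[j]:
--             return True
--         if arr1[i] <= arr2[j]:
--             i += 1
--         else:
--             j += 1
--
--     return False
-- ===== SOURCE B (Python) =====
-- def checkSameElementExistence(arr1, arr2):
--     # Stage 1: fully merge the two lists into one tagged list (tag 0 = from
--     # arr1, tag 1 = from arr2), taking from arr1 on ties; no equality testing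
--     # and no early exit here.
--     merged = []
--     i = 0
--     j = 0
--     n1 = len(arr1)
--     n2 = len(arr2)
--     while i < n1 and j < n2:
--         if arr1[i] <= arr2[j]:
--             merged.append((0, arr1[i]))
--             i += 1
--         else:
--             merged.append((1, arr2[j]))
--             j += 1
--     while i < n1:
--         merged.append((0, arr1[i]))
--         i += 1
--     while j < n2:
--         merged.append((1, arr2[j]))
--         j += 1
--     # Stage 2: scan the merged list backwards, remembering the nearest arr2
--     # element seen so far; an arr1 element matching it is a common element.
--     pending = None
--     for tag, v in reversed(merged):
--         if tag == 1:
--             pending = v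
--         elif pending is not None and v == pending:
--             return True
--     return False
-- ===== Notes on version B (the rewrite author's own statement) =====
-- stated objective: alternative
-- what changed: Replaces A's on-line early-exit two-pointer equality search with two staged passes: first a full tag-merge of both lists into one auxiliary list (no equality test, no early exit), then a backward scan of that list that matches each arr1-tagged element against the nearest following arr2-tagged element.
import Mathlib
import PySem

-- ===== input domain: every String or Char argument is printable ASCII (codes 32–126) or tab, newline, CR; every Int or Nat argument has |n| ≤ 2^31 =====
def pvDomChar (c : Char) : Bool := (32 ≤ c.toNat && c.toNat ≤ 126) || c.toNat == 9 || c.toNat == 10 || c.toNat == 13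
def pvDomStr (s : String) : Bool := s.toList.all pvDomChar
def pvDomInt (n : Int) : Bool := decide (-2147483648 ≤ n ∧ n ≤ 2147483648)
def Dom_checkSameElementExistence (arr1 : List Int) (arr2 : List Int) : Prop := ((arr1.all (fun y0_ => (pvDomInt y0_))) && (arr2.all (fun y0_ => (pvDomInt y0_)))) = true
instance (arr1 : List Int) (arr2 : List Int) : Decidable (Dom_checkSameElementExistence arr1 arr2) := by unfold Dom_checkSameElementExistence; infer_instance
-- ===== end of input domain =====

-- B replaces A's early-exit two-pointer search with two staged passes (a full tag-merge into an auxiliary list, then a backward matching scan); same asymptotic cost, different decomposition.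


-- ===== PORT A =====
-- A's while loop over the two advancing indices, as structural recursion on the suffixes
def goA : List Int → List Int → Bool
  | x :: a, y :: b =>
    if x = y then true
    else if x ≤ y then goA a (y :: b)
    else goA (x :: a) b
  | _, _ => false

def checkSameElementExistence (arr1 : List Int) (arr2 : List Int) : Bool :=
  goA arr1 arr2

-- ===== PORT B =====
-- stage 1 of Source B: full tag-merge (tag 0 = from arr1, tag 1 = from arr2, ties from arr1)
def mergeT : List Int → List Int → List (Nat × Int)
  | x :: a, y :: b =>
    if x ≤ y then (0, x) :: mergeT a (y :: b)
    else (1, y) :: mergeT (x :: a) b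
  | [], b => b.map (fun v => (1, v))
  | a, [] => a.map (fun v => (0, v))

-- stage 2 of Source B: the for-loop over reversed(merged), threading 'pending' (early return = true)
def scanB : List (Nat × Int) → Option Int → Bool
  | [], _ => false
  | (tag, v) :: rest, pending =>
    if tag = 1 then scanB rest (some v)
    else
      match pending with
      | some p => if v = p then true else scanB rest pending
      | none => scanB rest pending

def checkSameElementExistence_alt (arr1 : List Int) (arr2 : List Int) : Bool :=
  scanB (mergeT arr1 arr2).reverse none

-- ===== PRECONDITION & SPEC =====
def Spec_checkSameElementExistence (arr1 : List Int) (arr2 : List Int) (out : Bool) : Prop := out = checkSameElementExistence_alt arr1 arr2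
instance (arr1 : List Int) (arr2 : List Int) (out : Bool) : Decidable (Spec_checkSameElementExistence arr1 arr2 out) := by unfold Spec_checkSameElementExistence; infer_instance

-- ===== CLAIM (what is proved, stated in full; the proofs are below) =====
def Claim_equal_checkSameElementExistence : Prop := ∀ (arr1 : List Int) (arr2 : List Int), Dom_checkSameElementExistence arr1 arr2 → Spec_checkSameElementExistence arr1 arr2 (checkSameElementExistence arr1 arr2)

-- ===== LEMMAS AND PROOFS =====

-- the value 'pending' holds after scanB has processed l starting from p
def pend : List (Nat × Int) → Option Int → Option Int
  | [], p => p
  | (tag, v) :: l, p => pend l (if tag = 1 then some v else p)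

-- first arr2-tagged value of m, defaulting to p (the 'pending' seen from the right)
def nxt2P : List (Nat × Int) → Option Int → Option Int
  | [], p => p
  | (tag, v) :: m, p => if tag = 1 then some v else nxt2P m p

-- forward (left-to-right) reading of B's backward scan
def fwdP : List (Nat × Int) → Option Int → Bool
  | [], _ => false
  | (tag, v) :: m, p =>
    if tag = 1 then fwdP m p
    else ((nxt2P m p = some v : Bool) || fwdP m p)

theorem scanB_append (l l' : List (Nat × Int)) (p : Option Int) :
    scanB (l ++ l') p = (scanB l p || scanB l' (pend l p)) := by
  induction l generalizing p with
  | nil => simp [scanB, pend]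
  | cons x l ih =>
    obtain ⟨tag, v⟩ := x
    by_cases h1 : tag = 1
    · simp [scanB, pend, h1, ih]
    · cases p with
      | none => simp [scanB, pend, h1, ih]
      | some q =>
        by_cases hv : v = q
        · simp [scanB, pend, h1, hv]
        · simp [scanB, pend, h1, hv, ih]

theorem pend_append (l l' : List (Nat × Int)) (p : Option Int) :
    pend (l ++ l') p = pend l' (pend l p) := by
  induction l generalizing p with
  | nil => simp [pend]
  | cons x l ih => obtain ⟨tag, v⟩ := x; simp [pend, ih]

theorem pend_reverse (m : List (Nat × Int)) (p : Option Int) :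
    pend m.reverse p = nxt2P m p := by
  induction m generalizing p with
  | nil => simp [pend, nxt2P]
  | cons x m ih =>
    obtain ⟨tag, v⟩ := x
    rw [List.reverse_cons, pend_append, ih]
    by_cases h1 : tag = 1 <;> simp [pend, nxt2P, h1]

theorem scanB_reverse (m : List (Nat × Int)) (p : Option Int) :
    scanB m.reverse p = fwdP m p := by
  induction m generalizing p with
  | nil => simp [scanB, fwdP]
  | cons x m ih =>
    obtain ⟨tag, v⟩ := x
    rw [List.reverse_cons, scanB_append, ih, pend_reverse]
    by_cases h1 : tag = 1
    · simp [scanB, fwdP, h1]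
    · cases hq : nxt2P m p with
      | none => simp [scanB, fwdP, h1, hq]
      | some q =>
        by_cases hv : v = q
        · simp [scanB, fwdP, h1, hq, hv]
        · simp [scanB, fwdP, h1, hq, hv, Ne.symm hv]

-- in a merge with a nonempty right list, the first arr2-tagged element is its head
theorem nxt2P_merge (a : List Int) (y : Int) (b : List Int) (p : Option Int) :
    nxt2P (mergeT a (y :: b)) p = some y := by
  induction a with
  | nil => simp [mergeT, nxt2P]
  | cons z a ih =>
    by_cases h : z ≤ y <;> simp [mergeT, nxt2P, h, ih]

theorem fwdP_tag1 (b : List Int) (p : Option Int) :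
    fwdP (b.map (fun v => (1, v))) p = false := by
  induction b generalizing p with
  | nil => rfl
  | cons y b ih => simp [fwdP, ih]

theorem nxt2P_tag0 (a : List Int) :
    nxt2P (a.map (fun v => (0, v))) none = none := by
  induction a with
  | nil => rfl
  | cons x a ih => simp [nxt2P, ih]

theorem fwdP_tag0 (a : List Int) :
    fwdP (a.map (fun v => (0, v))) none = false := by
  induction a with
  | nil => rfl
  | cons x a ih => simp [fwdP, ih, nxt2P_tag0]

-- A's on-line merge walk equals the forward reading of B's two passes
theorem goA_eq_fwdP (a b : List Int) : goA a b = fwdP (mergeT a b) none := by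
  fun_induction mergeT a b with
  | case1 x a y b hle ih =>
    rw [goA, fwdP]
    simp only [nxt2P_merge, if_neg (by decide : ¬ (0 = 1))]
    by_cases hxy : x = y
    · simp [hxy]
    · simp [hxy, Ne.symm hxy, hle, ih]
  | case2 x a y b hle ih =>
    have hne : x ≠ y := by omega
    rw [goA, fwdP]
    simp [hne, hle, ih]
  | case3 b =>
    cases b with
    | nil => simp [goA, fwdP]
    | cons y b => simp [goA, fwdP, fwdP_tag1]
  | case4 a h =>
    cases a with
    | nil => simp at h
    | cons x a => simp [goA, fwdP, nxt2P_tag0, fwdP_tag0]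

-- ===== VERDICT (by name: the statement is the Claim_ definition above) =====
theorem checkSameElementExistence_spec : Claim_equal_checkSameElementExistence := by
  intro arr1 arr2 _
  unfold Spec_checkSameElementExistence checkSameElementExistence checkSameElementExistence_alt
  rw [scanB_reverse, goA_eq_fwdP]
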